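-- pv_equiv track=rewrite | github.com/ansarifaiyaz28/receivedPower | imageLocation.py | boundary
-- ===== SOURCE A (Python) =====
-- def boundaryCoordinates(n):
--     return [[0,0,0], [0,0,n], [0,n,0], [0,n,n], [n,0,0], [n,0,n], [n,n,0], [n,n,n]] #coordinates respectively in :O, E, A, F, C, D, B, G:
--
-- def boundary(n):
--     boundaryCoordinate = boundaryCoordinates(n)
--     cubeside = 6
--     east = []   #OABC
--     west = []   #DEFG
--     north = []  #OAFE
--     south = []  #BCDG
--     top = []    #ABGF
--     bottom = [] #OCDE
--     for i in range(cubeside-1):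
--         for j in boundaryCoordinate:
--             if j[0] == 0 and len(north)<4 :
--                 north.append(j)
--             if j[0] == n and len(south)<4 :
--                 south.append(j)
--             if j[1] == 0 and len(bottom)<4 :
--                 bottom.append(j)
--             if j[1] == n and len(top)<4 :
--                 top.append(j)
--             if j[2] == 0 and len(east)<4 :
--                 east.append(j)
--             if j[2] == n and len(west)<4 :
--                 west.append(j)
--     boundaryDictionary = {'east':east, 'west':west, 'north':north, 'south':south, 'top':top, 'bottom':bottom}
--     return boundaryDictionary
-- ===== SOURCE B (Python) =====
-- def boundaryCoordinates(n):
--     return [[0,0,0], [0,0,n], [0,n,0], [0,n,n], [n,0,0], [n,0,n], [n,n,0], [n,n,n]]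
--
-- def boundary(n):
--     coords = boundaryCoordinates(n)
--     specs = [('east', 2, 0), ('west', 2, n), ('north', 0, 0),
--              ('south', 0, n), ('top', 1, n), ('bottom', 1, 0)]
--     return {name: [c for c in coords if c[idx] == val][:4] for name, idx, val in specs}
-- ===== Notes on version B (the rewrite author's own statement) =====
-- stated objective: simpler
-- what changed: Replaces A's redundant repeated nested loop over six capped accumulator lists with a table of (name, axis, value) face specs, each face computed as one filtered comprehension truncated to the first four matches.
import Mathlib
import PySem

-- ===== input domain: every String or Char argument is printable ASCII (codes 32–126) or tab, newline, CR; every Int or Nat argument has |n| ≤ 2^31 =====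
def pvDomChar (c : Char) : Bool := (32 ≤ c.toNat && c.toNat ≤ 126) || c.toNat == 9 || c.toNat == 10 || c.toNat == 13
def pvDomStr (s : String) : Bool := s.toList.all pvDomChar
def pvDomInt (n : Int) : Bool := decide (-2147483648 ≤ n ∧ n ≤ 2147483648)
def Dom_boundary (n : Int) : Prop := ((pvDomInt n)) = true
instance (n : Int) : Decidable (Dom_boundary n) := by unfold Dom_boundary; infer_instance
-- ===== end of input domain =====

-- B replaces A's redundant 5× accumulator loop by six filtered comprehensions capped with [:4] (objective: simpler).

-- ===== PORT A =====
def boundaryCoordinatesA (n : Int) : List (List Int) :=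
  [[0,0,0], [0,0,n], [0,n,0], [0,n,n], [n,0,0], [n,0,n], [n,n,0], [n,n,n]]

def boundary (n : Int) : List (String × List (List Int)) :=
  let bc := boundaryCoordinatesA n
  let s := (PySem.List.pyRange 0 (6-1) 1).foldl (fun st _ =>
    bc.foldl (fun st j =>
      let (east, west, north, south, top, bottom) := st
      let north := if PySem.List.pyGet? j 0 = some 0 ∧ north.length < 4 then north ++ [j] else north
      let south := if PySem.List.pyGet? j 0 = some n ∧ south.length < 4 then south ++ [j] else south
      let bottom := if PySem.List.pyGet? j 1 = some 0 ∧ bottom.length < 4 then bottom ++ [j] else bottom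
      let top := if PySem.List.pyGet? j 1 = some n ∧ top.length < 4 then top ++ [j] else top
      let east := if PySem.List.pyGet? j 2 = some 0 ∧ east.length < 4 then east ++ [j] else east
      let west := if PySem.List.pyGet? j 2 = some n ∧ west.length < 4 then west ++ [j] else west
      (east, west, north, south, top, bottom)) st)
    (([] : List (List Int)), ([] : List (List Int)), ([] : List (List Int)),
     ([] : List (List Int)), ([] : List (List Int)), ([] : List (List Int)))
  [("east", s.1), ("west", s.2.1), ("north", s.2.2.1),
   ("south", s.2.2.2.1), ("top", s.2.2.2.2.1), ("bottom", s.2.2.2.2.2)]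

-- ===== PORT B =====
def boundaryCoordinatesB (n : Int) : List (List Int) :=
  [[0,0,0], [0,0,n], [0,n,0], [0,n,n], [n,0,0], [n,0,n], [n,n,0], [n,n,n]]

def boundary_alt (n : Int) : List (String × List (List Int)) :=
  let coords := boundaryCoordinatesB n
  let specs : List (String × Int × Int) :=
    [("east", 2, 0), ("west", 2, n), ("north", 0, 0), ("south", 0, n), ("top", 1, n), ("bottom", 1, 0)]
  specs.map (fun (p : String × Int × Int) =>
    (p.1, (coords.filter (fun c => PySem.List.pyGet? c p.2.1 == some p.2.2)).take 4))

-- ===== PRECONDITION & SPEC =====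
def Spec_boundary (n : Int) (out : List (String × List (List Int))) : Prop := out = boundary_alt n
instance (n : Int) (out : List (String × List (List Int))) : Decidable (Spec_boundary n out) := by unfold Spec_boundary; infer_instance

-- ===== CLAIM (what is proved, stated in full; the proofs are below) =====
def Claim_equal_boundary : Prop := ∀ (n : Int), Dom_boundary n → Spec_boundary n (boundary n)

-- ===== LEMMAS AND PROOFS =====

-- ===== VERDICT (by name: the statement is the Claim_ definition above) =====
set_option maxRecDepth 8000 in
theorem boundary_spec : Claim_equal_boundary := by
  intro n _
  unfold Spec_boundary
  by_cases h : n = 0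
  · subst h; decide
  · simp only [boundary, boundary_alt, boundaryCoordinatesA, boundaryCoordinatesB]
    rw [show PySem.List.pyRange 0 (6-1) 1 = [0,1,2,3,4] from by decide]
    rw [List.foldl_cons, List.foldl_cons, List.foldl_cons, List.foldl_cons,
        List.foldl_cons, List.foldl_nil]
    simp [PySem.List.pyGet?, PySem.List.pyIdx?, h, Ne.symm h]
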